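-- pv_equiv track=rewrite | github.com/gilad-rubin/hypergraph | src/hypergraph/viz/renderer/scope.py | find_deepest_common_container
-- ===== SOURCE A (Python) =====
-- def find_deepest_common_container(ancestor_chains: list[list[str]]) -> str | None:
--     """Find the deepest common container across all ancestor chains."""
--     if not ancestor_chains:
--         return None
--
--     if any(not chain for chain in ancestor_chains):
--         return None
--
--     first_chain = ancestor_chains[0]
--     for container in first_chain:
--         if all(container in chain for chain in ancestor_chains[1:]):
--             return container
--
--     return None
-- ===== SOURCE B (Python) =====
-- def find_deepest_common_container(ancestor_chains: list[list[str]]) -> str | None: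
--     """Find the deepest common container across all ancestor chains.
--
--     One pass builds a frequency table mapping each container to the number of
--     chains containing it (deduplicated per chain); then a single scan over the
--     first chain returns the first container present in every chain.
--     """
--     if not ancestor_chains:
--         return None
--
--     counts: dict[str, int] = {}
--     for chain in ancestor_chains:
--         for container in set(chain):
--             counts[container] = counts.get(container, 0) + 1
--
--     n = len(ancestor_chains)
--     for container in ancestor_chains[0]:
--         if counts.get(container, 0) == n:
--             return container
--
--     return None
-- ===== Notes on version B (the rewrite author's own statement) =====
-- stated objective: alternative
-- what changed: Replaced the nested scan (for each element of the first chain, an all() membership test over every other chain) by a frequency table built in one pass over all chains (deduplicated per chain) followed by a single linear scan of the first chain; the explicit empty-chain guard disappears because an empty chain keeps every count below the chain total.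
import Mathlib
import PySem

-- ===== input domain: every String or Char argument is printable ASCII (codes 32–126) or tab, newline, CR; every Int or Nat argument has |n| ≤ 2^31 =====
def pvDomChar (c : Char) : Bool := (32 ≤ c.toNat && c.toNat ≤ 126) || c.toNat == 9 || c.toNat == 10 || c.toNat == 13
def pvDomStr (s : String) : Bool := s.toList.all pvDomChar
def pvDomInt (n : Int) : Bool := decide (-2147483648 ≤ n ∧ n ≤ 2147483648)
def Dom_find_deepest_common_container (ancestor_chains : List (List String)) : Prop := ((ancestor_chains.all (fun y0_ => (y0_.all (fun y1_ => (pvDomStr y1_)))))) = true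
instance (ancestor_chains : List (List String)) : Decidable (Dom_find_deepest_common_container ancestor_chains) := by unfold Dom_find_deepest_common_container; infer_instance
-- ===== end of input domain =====

-- B replaces A's nested membership scan by a one-pass frequency table (count of chains
-- containing each container, deduplicated per chain) plus a single scan of the first chain.

-- ===== PORT A =====
def find_deepest_common_container (ancestor_chains : List (List String)) : Option String :=
  if ancestor_chains.isEmpty then none
  else if ancestor_chains.any (fun chain => chain.isEmpty) then none
  else
    let first_chain := ancestor_chains.headD []
    first_chain.find? (fun container =>
      (ancestor_chains.tail).all (fun chain => chain.contains container))

-- ===== PORT B =====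
def find_deepest_common_container_alt (ancestor_chains : List (List String)) : Option String :=
  match ancestor_chains with
  | [] => none
  | first_chain :: _ =>
    let counts : PySem.Dict String Int :=
      ancestor_chains.foldl
        (fun d chain => (PySem.Set.ofList chain).foldl (fun d c => d.modify c 0 (· + 1)) d)
        PySem.Dict.empty
    let n : Int := ancestor_chains.length
    first_chain.find? (fun container => counts.getD container 0 == n)

-- ===== PRECONDITION & SPEC =====
def Spec_find_deepest_common_container (ancestor_chains : List (List String)) (out : Option String) : Prop := out = find_deepest_common_container_alt ancestor_chains
instance (ancestor_chains : List (List String)) (out : Option String) : Decidable (Spec_find_deepest_common_container ancestor_chains out) := by unfold Spec_find_deepest_common_container; infer_instance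

-- ===== CLAIM (what is proved, stated in full; the proofs are below) =====
def Claim_equal_find_deepest_common_container : Prop := ∀ (ancestor_chains : List (List String)), Dom_find_deepest_common_container ancestor_chains → Spec_find_deepest_common_container ancestor_chains (find_deepest_common_container ancestor_chains)

-- ===== LEMMAS AND PROOFS =====

-- ===== VERDICT (by name: the statement is the Claim_ definition above) =====
-- count of chains containing c, accumulated through the nested fold
lemma counts_getD (acs : List (List String)) (d : PySem.Dict String Int) (c : String) :
    (acs.foldl (fun d chain => (PySem.Set.ofList chain).foldl (fun d c => d.modify c 0 (· + 1)) d) d).getD c 0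
      = d.getD c 0 + (acs.countP (fun chain => decide (c ∈ chain)) : Int) := by
  induction acs generalizing d with
  | nil => simp
  | cons chain rest ih =>
    simp only [List.foldl_cons, List.countP_cons]
    rw [ih, PySem.Dict.getD_foldl_modify_add_one]
    by_cases h : c ∈ chain
    · simp [h]; ring
    · have h0 : (PySem.Set.ofList chain).count c = 0 := by
        apply List.count_eq_zero_of_not_mem
        simpa [PySem.Set.mem_ofList] using h
      simp [h, h0]

lemma find?_congr_mem {p q : String → Bool} (l : List String)
    (h : ∀ x ∈ l, p x = q x) : l.find? p = l.find? q := by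
  induction l with
  | nil => rfl
  | cons a t ih =>
    simp only [List.find?_cons, h a (List.mem_cons_self)]
    cases q a <;> simp [ih (fun x hx => h x (List.mem_cons_of_mem a hx))]

-- ===== VERDICT (by name: the statement is the Claim_ definition above) =====
theorem find_deepest_common_container_spec : Claim_equal_find_deepest_common_container := by
  intro acs _
  unfold Spec_find_deepest_common_container find_deepest_common_container find_deepest_common_container_alt
  match acs with
  | [] => rfl
  | first :: rest =>
    simp only [List.isEmpty_cons, Bool.false_eq_true, if_false, List.headD_cons, List.tail_cons]
    have key : ∀ c ∈ first,
        (rest.all (fun chain => chain.contains c))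
          = (((first :: rest).foldl (fun d chain => (PySem.Set.ofList chain).foldl
                (fun d c => d.modify c 0 (· + 1)) d) PySem.Dict.empty).getD c 0
              == ((first :: rest).length : Int)) := by
      intro c hc
      rw [counts_getD]
      simp only [PySem.Dict.getD_empty, zero_add]
      have hcount : (first :: rest).countP (fun chain => decide (c ∈ chain))
            = (first :: rest).length
          ↔ ∀ chain ∈ (first :: rest), c ∈ chain := by
        constructor
        · intro h chain hm
          have := List.countP_eq_length.mp h chain hm
          simpa using this
        · intro h
          exact List.countP_eq_length.mpr (fun chain hm => by simpa using h chain hm)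
      by_cases hall : ∀ chain ∈ rest, c ∈ chain
      · have : (first :: rest).countP (fun chain => decide (c ∈ chain)) = (first :: rest).length := by
          apply hcount.mpr
          intro chain hm
          rcases List.mem_cons.mp hm with h | h
          · exact h ▸ hc
          · exact hall chain h
        simp [this, List.all_eq_true]
        intro x hx
        exact hall x hx
      · have hne : (first :: rest).countP (fun chain => decide (c ∈ chain)) ≠ (first :: rest).length := by
          intro h
          exact hall (fun chain hm => hcount.mp h chain (List.mem_cons_of_mem first hm))
        have : ¬ (rest.all (fun chain => chain.contains c) = true) := by
          simp only [List.all_eq_true, List.contains_iff_mem]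
          exact fun h => hall (fun chain hm => by simpa using h chain hm)
        simp only [Bool.not_eq_true] at this
        rw [this]
        symm
        simp only [beq_eq_false_iff_ne, ne_eq]
        exact fun h => hne (by exact_mod_cast h)
    by_cases hemp : (first :: rest).any (fun chain => chain.isEmpty)
    · -- some chain is empty: A returns none; B's predicate is false on every c
      rw [if_pos hemp]
      symm
      apply List.find?_eq_none.mpr
      intro c hc
      rw [← key c hc]
      simp only [List.any_eq_true, List.isEmpty_iff] at hemp
      rcases hemp with ⟨chain, hm, hnil⟩
      rcases List.mem_cons.mp hm with h | h
      · simp [← h, hnil] at hc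
      · simp only [Bool.not_eq_true, List.all_eq_false]
        exact ⟨chain, h, by simp [hnil]⟩
    · rw [if_neg hemp]
      exact find?_congr_mem first key
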